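-- pv_equiv track=rewrite | github.com/benoitdebecker1995-png/history-vs-hype | tools/script_checkers/checkers/flow.py | _overall_severity
-- ===== SOURCE A (Python) =====
-- from typing import Dict, List, Any, Set, Tuple
--
-- def _overall_severity(issues: List[Dict[str, Any]]) -> str:
--     """Determine overall severity"""
--     if not issues:
--         return 'ok'
--
--     severities = [i['severity'] for i in issues]
--     if 'error' in severities:
--         return 'error'
--     elif 'warning' in severities:
--         return 'warning'
--     elif 'info' in severities:
--         return 'info'
--     else:
--         return 'ok'
-- ===== SOURCE B (Python) =====
-- def _overall_severity(issues):
--     """Determine overall severity"""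
--     if not issues:
--         return 'ok'
--     rank = {'error': 3, 'warning': 2, 'info': 1}
--     best = 0
--     for i in issues:
--         best = max(best, rank.get(i['severity'], 0))
--     return {3: 'error', 2: 'warning', 1: 'info', 0: 'ok'}[best]
-- ===== Notes on version B (the rewrite author's own statement) =====
-- stated objective: simpler
-- what changed: Replaces the intermediate severity list plus three separate membership scans with a single pass accumulating the maximum severity rank, mapped back to its name at the end.
import Mathlib
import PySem

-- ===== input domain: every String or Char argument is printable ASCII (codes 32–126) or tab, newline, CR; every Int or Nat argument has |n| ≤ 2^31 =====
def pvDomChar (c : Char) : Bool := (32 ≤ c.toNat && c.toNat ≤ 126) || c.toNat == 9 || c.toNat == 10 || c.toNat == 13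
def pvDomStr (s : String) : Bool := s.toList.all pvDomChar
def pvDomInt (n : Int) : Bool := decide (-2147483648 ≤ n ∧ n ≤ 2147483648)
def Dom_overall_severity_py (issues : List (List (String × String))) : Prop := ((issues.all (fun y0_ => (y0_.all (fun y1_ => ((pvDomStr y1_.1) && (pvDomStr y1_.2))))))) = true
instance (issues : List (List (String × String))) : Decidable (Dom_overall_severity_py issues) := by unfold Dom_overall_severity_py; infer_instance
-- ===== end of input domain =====

-- B replaces A's severity list + three membership scans by a single max-rank accumulating pass (objective: simpler).


-- shared primitive: the Python expression i['severity'] on the dict i (Pre_ guarantees the key is present,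
-- so the `.getD ""` default is never reached on admitted inputs)
def pvSev (d : List (String × String)) : String := ((PySem.Dict.ofList d).get? "severity").getD ""

-- ===== PORT A =====
def overall_severity_py (issues : List (List (String × String))) : String :=
  if issues = [] then "ok"
  else
    let severities := issues.map pvSev
    if "error" ∈ severities then "error"
    else if "warning" ∈ severities then "warning"
    else if "info" ∈ severities then "info"
    else "ok"

-- ===== PORT B =====
def pvRank (s : String) : Nat :=
  if s = "error" then 3 else if s = "warning" then 2 else if s = "info" then 1 else 0

def pvUnrank (n : Nat) : String :=
  if n = 3 then "error" else if n = 2 then "warning" else if n = 1 then "info" else "ok"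

def overall_severity_py_alt (issues : List (List (String × String))) : String :=
  if issues = [] then "ok"
  else pvUnrank (issues.foldl (fun best i => max best (pvRank (pvSev i))) 0)

-- ===== PRECONDITION & SPEC =====
-- Pre_ excludes exactly the inputs where some issue dict lacks the 'severity' key: there A raises KeyError (and B does too).
def Pre_overall_severity_py (issues : List (List (String × String))) : Prop :=
  ∀ d ∈ issues, (PySem.Dict.ofList d).contains "severity" = true
instance (issues : List (List (String × String))) : Decidable (Pre_overall_severity_py issues) := by
  unfold Pre_overall_severity_py; infer_instance

def pvWitness_overall_severity_py : (List (List (String × String))) :=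
  [[("severity", "warning")], [("severity", "info"), ("line", "3")]]

def Spec_overall_severity_py (issues : List (List (String × String))) (out : String) : Prop := out = overall_severity_py_alt issues
instance (issues : List (List (String × String))) (out : String) : Decidable (Spec_overall_severity_py issues out) := by unfold Spec_overall_severity_py; infer_instance

-- ===== CLAIM (what is proved, stated in full; the proofs are below) =====
def Claim_equal_overall_severity_py : Prop := ∀ (issues : List (List (String × String))), Dom_overall_severity_py issues → Pre_overall_severity_py issues → Spec_overall_severity_py issues (overall_severity_py issues)

-- ===== LEMMAS AND PROOFS =====

-- A's membership chain, as a function of the severity list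
def pvChain (l : List String) : String :=
  if "error" ∈ l then "error" else if "warning" ∈ l then "warning" else if "info" ∈ l then "info" else "ok"

lemma pvRank_le (s : String) : pvRank s ≤ 3 := by
  unfold pvRank; split_ifs <;> omega

lemma rank_chain_cons (x : String) (l : List String) :
    pvRank (pvChain (x :: l)) = max (pvRank x) (pvRank (pvChain l)) := by
  by_cases he : x = "error"
  · subst he
    have hc : pvChain ("error" :: l) = "error" := by simp [pvChain]
    rw [hc]
    have := pvRank_le (pvChain l)
    show (3 : Nat) = max 3 _
    omega
  · by_cases hw : x = "warning"
    · subst hw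
      by_cases hel : "error" ∈ l
      · have hc : pvChain ("warning" :: l) = "error" := by simp [pvChain, hel]
        have hcl : pvChain l = "error" := by simp [pvChain, hel]
        rw [hc, hcl]; rfl
      · have hc : pvChain ("warning" :: l) = "warning" := by
          simp [pvChain, hel]
        have hcl : pvRank (pvChain l) ≤ 2 := by
          unfold pvChain; rw [if_neg hel]; split_ifs <;> decide
        rw [hc]
        show (2 : Nat) = max 2 _
        omega
    · by_cases hi : x = "info"
      · subst hi
        by_cases hel : "error" ∈ l
        · have hc : pvChain ("info" :: l) = "error" := by
            simp [pvChain, hel]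
          have hcl : pvChain l = "error" := by simp [pvChain, hel]
          rw [hc, hcl]; rfl
        · by_cases hwl : "warning" ∈ l
          · have hc : pvChain ("info" :: l) = "warning" := by
              simp [pvChain, hel, hwl]
            have hcl : pvChain l = "warning" := by simp [pvChain, hel, hwl]
            rw [hc, hcl]; rfl
          · have hc : pvChain ("info" :: l) = "info" := by
              simp [pvChain, hel, hwl]
            have hcl : pvRank (pvChain l) ≤ 1 := by
              unfold pvChain; rw [if_neg hel, if_neg hwl]; split_ifs <;> decide
            rw [hc]
            show (1 : Nat) = max 1 _
            omega
      · have hc : pvChain (x :: l) = pvChain l := by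
          unfold pvChain
          simp [List.mem_cons, Ne.symm he, Ne.symm hw, Ne.symm hi]
        have hx : pvRank x = 0 := by
          unfold pvRank; rw [if_neg he, if_neg hw, if_neg hi]
        rw [hc, hx]
        omega

lemma unrank_rank_chain (l : List String) : pvUnrank (pvRank (pvChain l)) = pvChain l := by
  simp only [pvChain]
  split_ifs <;> rfl

lemma fold_eq (issues : List (List (String × String))) :
    ∀ acc : Nat,
      issues.foldl (fun best i => max best (pvRank (pvSev i))) acc
        = max acc (pvRank (pvChain (issues.map pvSev))) := by
  induction issues with
  | nil => intro acc; simp [pvChain, pvRank]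
  | cons d t ih =>
      intro acc
      simp only [List.foldl_cons, List.map_cons, ih, rank_chain_cons]
      omega

-- ===== VERDICT (by name: the statement is the Claim_ definition above) =====
theorem overall_severity_py_spec : Claim_equal_overall_severity_py := by
  intro issues _ _
  unfold Spec_overall_severity_py overall_severity_py overall_severity_py_alt
  by_cases h : issues = []
  · simp [h]
  · simp only [h, if_false]
    rw [fold_eq issues 0]
    simpa [pvChain] using (unrank_rank_chain (issues.map pvSev)).symm
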